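-- pv_equiv track=rewrite | github.com/DiamondLightSource/scaup-backend | src/sample_handling/utils/generic.py | pascal_to_title
-- ===== SOURCE A (Python) =====
-- def pascal_to_title(original_str: str):
--     """Convert a pascal-cased string to a capitalised title"""
--
--     new_strs: list[str] = []
--     new_str = ""
--
--     for char in original_str:
--         if char.isupper():
--             new_strs.append(new_str.capitalize())
--             new_str = ""
--
--         new_str += char
--
--     new_strs.append(new_str.capitalize())
--
--     return " ".join(new_strs)
-- ===== SOURCE B (Python) =====
-- def pascal_to_title(original_str: str):
--     """Convert a pascal-cased string to a capitalised title"""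
--     bounds = [i for i, c in enumerate(original_str) if c.isupper()]
--     segments = []
--     prev = 0
--     for i in bounds:
--         segments.append(original_str[prev:i])
--         prev = i
--     segments.append(original_str[prev:])
--     return " ".join(seg.capitalize() for seg in segments)
-- ===== Notes on version B (the rewrite author's own statement) =====
-- stated objective: alternative
-- what changed: B first computes the uppercase boundary positions with enumerate, then slices the string at those cut points and joins the capitalized slices, instead of A's single pass that grows a current-word accumulator character by character.
import Mathlib
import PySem

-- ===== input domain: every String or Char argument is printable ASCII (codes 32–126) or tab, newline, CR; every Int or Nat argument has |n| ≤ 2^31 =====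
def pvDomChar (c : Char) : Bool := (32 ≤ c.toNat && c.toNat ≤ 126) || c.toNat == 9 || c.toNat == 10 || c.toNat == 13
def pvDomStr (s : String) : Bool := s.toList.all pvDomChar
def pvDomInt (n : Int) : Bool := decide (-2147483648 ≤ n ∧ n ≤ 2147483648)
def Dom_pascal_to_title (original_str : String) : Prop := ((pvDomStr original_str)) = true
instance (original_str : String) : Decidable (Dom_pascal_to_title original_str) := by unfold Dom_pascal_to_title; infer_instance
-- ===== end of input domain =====

-- B slices the string at the uppercase positions instead of A's char-by-char accumulator (alternative decomposition, same cost).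

-- Python str.capitalize(): first char uppercased, rest lowercased — exact on the ASCII domain
def pvCapitalize (cs : List Char) : List Char :=
  match cs with
  | [] => []
  | c :: rest => PySem.Chars.upperChar c :: rest.map PySem.Chars.lowerChar

-- ===== PORT A =====
def pascal_to_title (original_str : String) : String :=
  let st := original_str.toList.foldl
    (fun (acc : List (List Char) × List Char) char =>
      if PySem.Str.isupper char then (acc.1 ++ [pvCapitalize acc.2], [char])
      else (acc.1, acc.2 ++ [char]))
    ([], [])
  String.ofList (PySem.Chars.join [' '] (st.1 ++ [pvCapitalize st.2]))

-- ===== PORT B =====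
def pascal_to_title_alt (original_str : String) : String :=
  let cs := original_str.toList
  let bounds := (PySem.List.enumerate cs 0).filterMap
    (fun p => if PySem.Str.isupper p.2 then some p.1 else none)
  let st := bounds.foldl
    (fun (acc : List (List Char) × Int) i =>
      (acc.1 ++ [PySem.List.slice cs (some acc.2) (some i)], i))
    ([], 0)
  let segments := st.1 ++ [PySem.List.slice cs (some st.2) none]
  String.ofList (PySem.Chars.join [' '] (segments.map pvCapitalize))

-- ===== PRECONDITION & SPEC =====
def Spec_pascal_to_title (original_str : String) (out : String) : Prop := out = pascal_to_title_alt original_str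
instance (original_str : String) (out : String) : Decidable (Spec_pascal_to_title original_str out) := by unfold Spec_pascal_to_title; infer_instance

-- ===== CLAIM (what is proved, stated in full; the proofs are below) =====
def Claim_equal_pascal_to_title : Prop := ∀ (original_str : String), Dom_pascal_to_title original_str → Spec_pascal_to_title original_str (pascal_to_title original_str)

-- ===== LEMMAS AND PROOFS =====

-- absolute indices of uppercase chars in the suffix xs that starts at position i
def upsFrom : List Char → Nat → List Nat
  | [], _ => []
  | c :: t, i => if PySem.Str.isupper c then i :: upsFrom t (i + 1) else upsFrom t (i + 1)

-- the raw (uncapitalized) segments A's loop produces, given the current segment cur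
def splitRaw : List Char → List Char → List (List Char)
  | cur, [] => [cur]
  | cur, c :: t =>
    if PySem.Str.isupper c then cur :: splitRaw [c] t else splitRaw (cur ++ [c]) t

-- the segments B's slicing produces, from cut points bs and previous cut p
def cutSegs (cs : List Char) : Nat → List Nat → List (List Char)
  | p, [] => [cs.drop p]
  | p, b :: rest => ((cs.drop p).take (b - p)) :: cutSegs cs b rest

theorem enum_filter (xs : List Char) (i : Nat) :
    (PySem.List.enumerate xs (i : Int)).filterMap
        (fun p => if PySem.Str.isupper p.2 then some p.1 else none)
      = (upsFrom xs i).map (fun n : Nat => (n : Int)) := by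
  induction xs generalizing i with
  | nil => simp [upsFrom]
  | cons c t ih =>
    rw [PySem.List.enumerate_cons]
    have : ((i : Int) + 1) = ((i + 1 : Nat) : Int) := by push_cast; ring
    simp only [List.filterMap_cons, upsFrom, this, ih]
    by_cases h : PySem.Str.isupper c <;> simp [h]

theorem foldA (xs : List Char) (acc : List (List Char)) (cur : List Char) :
    (let r := xs.foldl
      (fun (acc : List (List Char) × List Char) char =>
        if PySem.Str.isupper char then (acc.1 ++ [pvCapitalize acc.2], [char])
        else (acc.1, acc.2 ++ [char])) (acc, cur)
     r.1 ++ [pvCapitalize r.2]) = acc ++ (splitRaw cur xs).map pvCapitalize := by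
  induction xs generalizing acc cur with
  | nil => simp [splitRaw]
  | cons c t ih =>
    by_cases h : PySem.Str.isupper c <;>
      simp [List.foldl_cons, h, splitRaw, ih]

theorem foldB (cs : List Char) (bs : List Nat) (p : Nat) (acc : List (List Char)) :
    (let r := (bs.map (fun n : Nat => (n : Int))).foldl
      (fun (acc : List (List Char) × Int) i =>
        (acc.1 ++ [PySem.List.slice cs (some acc.2) (some i)], i)) (acc, (p : Int))
     r.1 ++ [PySem.List.slice cs (some r.2) none]) = acc ++ cutSegs cs p bs := by
  induction bs generalizing p acc with
  | nil => simp [cutSegs, PySem.List.slice_from_natCast]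
  | cons b rest ih =>
    rw [List.map_cons, List.foldl_cons, ih, cutSegs, PySem.List.slice_natCast]
    simp

theorem cut_eq_split (cs : List Char) (xs : List Char) (p s : Nat)
    (hle : s ≤ p) (hlen : p - s ≤ (cs.drop s).length)
    (hdec : cs.drop s = (cs.drop s).take (p - s) ++ xs) :
    cutSegs cs s (upsFrom xs p) = splitRaw ((cs.drop s).take (p - s)) xs := by
  induction xs generalizing p s with
  | nil =>
    simp only [upsFrom, cutSegs, splitRaw]
    rw [List.append_nil] at hdec
    rw [← hdec]
  | cons c t ih =>
    have hlen' : ((cs.drop s).take (p - s)).length = p - s :=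
      by rw [List.length_take]; omega
    have hdropp : cs.drop p = c :: t := by
      have : cs.drop p = (cs.drop s).drop (p - s) := by
        rw [List.drop_drop]; congr 1; omega
      rw [this, hdec, List.drop_left' hlen']
    have hL : (cs.drop s).length = (p - s) + 1 + t.length := by
      have h3 := congrArg List.length hdec
      rw [List.length_append, hlen', List.length_cons] at h3
      omega
    by_cases h : PySem.Str.isupper c
    · simp only [upsFrom, h, if_true, cutSegs, splitRaw]
      have h1 : (cs.drop p).take (p + 1 - p) = [c] := by
        rw [hdropp]; simp
      have := ih (p := p + 1) (s := p) (by omega)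
        (by rw [hdropp]; simp)
        (by rw [h1, hdropp]; simp)
      rw [h1] at this
      rw [this]
    · have h2 : (cs.drop s).take (p + 1 - s) = (cs.drop s).take (p - s) ++ [c] := by
        conv_lhs => rw [hdec]
        rw [List.take_append, List.take_of_length_le (by omega), hlen']
        have h4 : p + 1 - s - (p - s) = 1 := by omega
        rw [h4]
        simp
      have hrec := ih (p := p + 1) (s := s) (by omega)
        (by omega)
        (by rw [h2]; conv_lhs => rw [hdec]
            simp)
      rw [h2] at hrec
      simp only [upsFrom, h, splitRaw]
      simp only [Bool.false_eq_true, if_false]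
      exact hrec

theorem pascal_to_title_spec : Claim_equal_pascal_to_title := by
  intro s _
  unfold Spec_pascal_to_title pascal_to_title pascal_to_title_alt
  have hz : (0 : Int) = ((0 : Nat) : Int) := rfl
  simp only [enum_filter s.toList 0, hz, foldB, foldA]
  have := cut_eq_split s.toList s.toList 0 0 (le_refl 0) (by simp) (by simp)
  simp only [List.drop_zero, Nat.sub_self, List.take_zero] at this
  rw [this]
  simp
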